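-- pv_equiv track=rewrite | github.com/mcci-usb/Cricket | src/uiMainApp.py | compareReqSw
-- ===== SOURCE A (Python) =====
-- def compareReqSw(swDict, exist_sw):
--     """
--     Compares the requested switch configuration with the existing switch configuration.
--
--     Parameters:
--         sw_dict (dict): The dictionary representing the requested switch configuration.
--         exist_sw (list): The list of dictionaries representing the existing switch configuration.
--
--     Returns:
--         bool: True if the requested switch configuration matches the existing switch configuration, False otherwise.
--
--     """
--     swkeys = list(swDict.keys())
--     swvals = list(swDict.values())
--
--     avail = {}
--     for pair in exist_sw:
--         avail[pair["port"]] = pair["model"]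
--
--     for port in swkeys:
--         try:
--             if swDict[port] != avail[port]:
--                 return False
--         except:
--             return False
--     return True
-- ===== SOURCE B (Python) =====
-- def compareReqSw(swDict, exist_sw):
--     # For each requested port, scan exist_sw directly (no avail dict),
--     # keeping the model of the LAST pair whose 'port' matches (dict overwrite).
--     for port in swDict:
--         found = None
--         for pair in exist_sw:
--             if pair["port"] == port:
--                 found = pair["model"]
--         if found is None or found != swDict[port]:
--             return False
--     return True
-- ===== Notes on version B (the rewrite author's own statement) =====
-- stated objective: alternative
-- what changed: B drops the intermediate avail dict entirely: for each requested port it scans exist_sw once, tracking the model of the last pair whose 'port' matches (reproducing dict overwrite), instead of first materialising a port->model dict and then looking ports up in it.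
import Mathlib
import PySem

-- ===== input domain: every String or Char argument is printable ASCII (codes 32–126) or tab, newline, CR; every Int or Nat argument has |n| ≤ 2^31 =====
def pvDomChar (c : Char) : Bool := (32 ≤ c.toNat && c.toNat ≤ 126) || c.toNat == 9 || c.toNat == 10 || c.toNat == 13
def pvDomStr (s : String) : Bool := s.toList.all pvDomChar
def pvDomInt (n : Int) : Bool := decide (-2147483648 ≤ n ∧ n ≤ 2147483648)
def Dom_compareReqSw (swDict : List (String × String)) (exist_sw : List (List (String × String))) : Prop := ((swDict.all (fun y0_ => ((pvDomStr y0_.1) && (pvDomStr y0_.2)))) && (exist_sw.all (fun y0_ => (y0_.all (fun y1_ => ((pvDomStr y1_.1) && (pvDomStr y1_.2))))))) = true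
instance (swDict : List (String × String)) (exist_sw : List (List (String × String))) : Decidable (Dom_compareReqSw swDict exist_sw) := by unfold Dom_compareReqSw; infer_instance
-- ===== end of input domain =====

-- B removes A's intermediate avail dict: each requested port is checked by a direct
-- last-match scan of exist_sw (objective: alternative decomposition, same results).


-- first-match lookup in an association-list dict (pair[k] / swDict[port])
def lookupFirst (l : List (String × String)) (k : String) : Option String :=
  (l.find? (fun p => p.1 == k)).map (·.2)

-- ===== PORT A =====
-- avail[pair["port"]] = pair["model"] loop; pairs missing a key are excluded by Pre_
def buildAvail (exist_sw : List (List (String × String))) : PySem.Dict String String :=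
  exist_sw.foldl (fun d pair =>
    match lookupFirst pair "port", lookupFirst pair "model" with
    | some p, some m => d.insert p m
    | _, _ => d) PySem.Dict.empty

-- the 'for port in swkeys: try …' loop
def goA (swDict : List (String × String)) (avail : PySem.Dict String String) :
    List String → Bool
  | [] => true
  | port :: rest =>
    match lookupFirst swDict port, avail.get? port with
    | some v, some m => if v ≠ m then false else goA swDict avail rest
    | _, _ => false

def compareReqSw (swDict : List (String × String)) (exist_sw : List (List (String × String))) : Bool :=
  let swkeys := swDict.map (·.1)
  goA swDict (buildAvail exist_sw) swkeys

-- ===== PORT B =====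
-- inner scan: model of the LAST pair whose "port" equals port
def findModel (exist_sw : List (List (String × String))) (port : String) : Option String :=
  exist_sw.foldl (fun acc pair =>
    match lookupFirst pair "port" with
    | some p => if p == port then lookupFirst pair "model" else acc
    | none => acc) none

def compareReqSw_alt (swDict : List (String × String)) (exist_sw : List (List (String × String))) : Bool :=
  swDict.all (fun p =>
    match findModel exist_sw p.1 with
    | none => false
    | some m => lookupFirst swDict p.1 == some m)

-- ===== PRECONDITION & SPEC =====
-- Pre_ excludes exactly the inputs where A raises: an exist_sw pair missing the
-- "port" or "model" key makes A's avail-building loop raise KeyError (uncaught).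
def Pre_compareReqSw (swDict : List (String × String)) (exist_sw : List (List (String × String))) : Prop :=
  ∀ pair ∈ exist_sw, (pair.any (fun p => p.1 == "port")) = true ∧ (pair.any (fun p => p.1 == "model")) = true
instance (swDict : List (String × String)) (exist_sw : List (List (String × String))) : Decidable (Pre_compareReqSw swDict exist_sw) := by unfold Pre_compareReqSw; infer_instance

def pvWitness_compareReqSw : (List (String × String)) × (List (List (String × String))) :=
  ([("1", "3141")], [[("port", "1"), ("model", "3141")]])

def Spec_compareReqSw (swDict : List (String × String)) (exist_sw : List (List (String × String))) (out : Bool) : Prop := out = compareReqSw_alt swDict exist_sw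
instance (swDict : List (String × String)) (exist_sw : List (List (String × String))) (out : Bool) : Decidable (Spec_compareReqSw swDict exist_sw out) := by unfold Spec_compareReqSw; infer_instance

-- ===== CLAIM (what is proved, stated in full; the proofs are below) =====
def Claim_equal_compareReqSw : Prop := ∀ (swDict : List (String × String)) (exist_sw : List (List (String × String))), Dom_compareReqSw swDict exist_sw → Pre_compareReqSw swDict exist_sw → Spec_compareReqSw swDict exist_sw (compareReqSw swDict exist_sw)

-- ===== LEMMAS AND PROOFS =====

-- on Pre_ inputs, looking a port up in avail is the last-match scan of B
theorem avail_eq_findModel (exist_sw : List (List (String × String)))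
    (d : PySem.Dict String String) (acc : Option String) (port : String)
    (hpre : ∀ pair ∈ exist_sw, (pair.any (fun p => p.1 == "port")) = true ∧ (pair.any (fun p => p.1 == "model")) = true)
    (h : d.get? port = acc) :
    (exist_sw.foldl (fun d pair =>
      match lookupFirst pair "port", lookupFirst pair "model" with
      | some p, some m => d.insert p m
      | _, _ => d) d).get? port =
    exist_sw.foldl (fun acc pair =>
      match lookupFirst pair "port" with
      | some p => if p == port then lookupFirst pair "model" else acc
      | none => acc) acc := by
  induction exist_sw generalizing d acc with
  | nil => simpa using h
  | cons pair rest ih =>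
    obtain ⟨hp, hm⟩ := hpre pair (List.mem_cons_self ..)
    have hps : (lookupFirst pair "port").isSome := by
      simp only [lookupFirst, Option.isSome_map]
      rw [List.find?_isSome]
      simpa [List.any_eq_true] using hp
    have hms : (lookupFirst pair "model").isSome := by
      simp only [lookupFirst, Option.isSome_map]
      rw [List.find?_isSome]
      simpa [List.any_eq_true] using hm
    obtain ⟨p, hpv⟩ := Option.isSome_iff_exists.mp hps
    obtain ⟨m, hmv⟩ := Option.isSome_iff_exists.mp hms
    simp only [List.foldl_cons, hpv, hmv]
    apply ih _ _ (fun q hq => hpre q (List.mem_cons_of_mem _ hq))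
    rw [PySem.Dict.get?_insert]
    by_cases hpe : port = p
    · simp [hpe]
    · have hne : (p == port) = false := by
        simpa using fun h' => hpe h'.symm
      simp [hpe, hne, h]

theorem lookup_isSome_of_mem_keys (swDict : List (String × String)) (port : String)
    (h : port ∈ swDict.map (·.1)) : (lookupFirst swDict port).isSome := by
  simp only [lookupFirst, Option.isSome_map]
  rw [List.find?_isSome]
  obtain ⟨p, hp, he⟩ := List.mem_map.mp h
  exact ⟨p, hp, by simp [he]⟩

-- A's key loop equals B's List.all over the same ports
theorem goA_eq_all (swDict : List (String × String)) (avail : PySem.Dict String String)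
    (exist_sw : List (List (String × String)))
    (havail : ∀ port, avail.get? port = findModel exist_sw port)
    (l : List String) (hl : ∀ port ∈ l, port ∈ swDict.map (·.1)) :
    goA swDict avail l = l.all (fun port =>
      match findModel exist_sw port with
      | none => false
      | some m => lookupFirst swDict port == some m) := by
  induction l with
  | nil => rfl
  | cons port rest ih =>
    obtain ⟨v, hv⟩ := Option.isSome_iff_exists.mp
      (lookup_isSome_of_mem_keys swDict port (hl port (List.mem_cons_self ..)))
    have hrest := ih (fun q hq => hl q (List.mem_cons_of_mem _ hq))
    simp only [goA, hv, havail, List.all_cons]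
    cases hfm : findModel exist_sw port with
    | none => simp
    | some m =>
      by_cases hvm : v = m
      · simp [hvm, hrest]
      · simp [hvm]

-- ===== VERDICT (by name: the statement is the Claim_ definition above) =====
theorem compareReqSw_spec : Claim_equal_compareReqSw := by
  intro swDict exist_sw _ hpre
  unfold Spec_compareReqSw compareReqSw compareReqSw_alt
  have havail : ∀ port, (buildAvail exist_sw).get? port = findModel exist_sw port := by
    intro port
    exact avail_eq_findModel exist_sw PySem.Dict.empty none port hpre (by simp)
  rw [goA_eq_all swDict (buildAvail exist_sw) exist_sw havail (swDict.map (·.1)) (fun _ h => h)]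
  rw [List.all_map]
  rfl
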